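-- pv_equiv track=rewrite | github.com/MEssiah1k/zz_ble_cs_gnuradio | analyze_continuous_capture.py | summarize_quality_flags
-- ===== SOURCE A (Python) =====
-- def summarize_quality_flags(flags: list[str]) -> str:
--     if not flags:
--         return "正常"
--     reasons: list[str] = []
--     if any(flag in {"short_burst", "suspicious_short"} for flag in flags):
--         reasons.append("尖针/短burst")
--     if any(flag in {"low_coherence", "wide_phase"} for flag in flags):
--         reasons.append("angle不聚合")
--     if "trimmed_head" in flags:
--         reasons.append("边界未截净")
--     if "skipped_to_preserve_slots" in flags:
--         reasons.append("为保留槽位跳过")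
--     if not reasons:
--         reasons = flags
--     seen: list[str] = []
--     for reason in reasons:
--         if reason not in seen:
--             seen.append(reason)
--     return ",".join(seen)
-- ===== SOURCE B (Python) =====
-- _BIT = {
--     "short_burst": 1,
--     "suspicious_short": 1,
--     "low_coherence": 2,
--     "wide_phase": 2,
--     "trimmed_head": 4,
--     "skipped_to_preserve_slots": 8,
-- }
-- _REASON = ["尖针/短burst", "angle不聚合", "边界未截净", "为保留槽位跳过"]
--
--
-- def _dedup(xs):
--     # recursive first-occurrence dedup: head, then dedup of the tail with head removed
--     if not xs:
--         return []
--     head = xs[0]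
--     return [head] + _dedup([x for x in xs[1:] if x != head])
--
--
-- def summarize_quality_flags(flags: list[str]) -> str:
--     if not flags:
--         return "正常"
--     mask = 0
--     for flag in flags:
--         mask |= _BIT.get(flag, 0)
--     if mask:
--         return ",".join(r for i, r in enumerate(_REASON) if mask >> i & 1)
--     return ",".join(_dedup(flags))
-- ===== Notes on version B (the rewrite author's own statement) =====
-- stated objective: alternative
-- what changed: Replaced A's four separate category scans over flags by a single fold that ORs per-flag bits from a flag->bit dict into one bitmask and then renders the reasons indexed by set bits, and replaced A's seen-list dedup loop by a recursive head-plus-filtered-tail dedup.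
import Mathlib
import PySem

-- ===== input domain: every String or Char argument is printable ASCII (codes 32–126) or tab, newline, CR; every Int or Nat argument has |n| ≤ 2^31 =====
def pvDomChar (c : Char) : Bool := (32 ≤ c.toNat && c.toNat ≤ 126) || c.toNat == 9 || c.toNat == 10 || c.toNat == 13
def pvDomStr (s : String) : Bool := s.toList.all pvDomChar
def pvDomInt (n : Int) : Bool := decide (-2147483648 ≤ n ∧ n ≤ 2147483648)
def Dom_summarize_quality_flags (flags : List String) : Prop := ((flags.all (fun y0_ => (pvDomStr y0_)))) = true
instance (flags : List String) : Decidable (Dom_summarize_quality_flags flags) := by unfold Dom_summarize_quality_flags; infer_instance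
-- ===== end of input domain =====

-- B replaces A's four separate category scans by a single fold ORing per-flag bits (from a
-- flag->bit dict) into one bitmask rendered afterwards, and A's seen-list dedup loop by a
-- recursive head-plus-filtered-tail dedup (alternative decomposition; same cost class).

-- ===== PORT A =====
def summarize_quality_flags (flags : List String) : String :=
  if flags = [] then "正常"
  else
    let reasons : List String :=
      (if flags.any (fun flag => PySem.Set.contains (["short_burst", "suspicious_short"] : PySem.Set String) flag)
        then ["尖针/短burst"] else []) ++
      (if flags.any (fun flag => PySem.Set.contains (["low_coherence", "wide_phase"] : PySem.Set String) flag)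
        then ["angle不聚合"] else []) ++
      (if flags.contains "trimmed_head" then ["边界未截净"] else []) ++
      (if flags.contains "skipped_to_preserve_slots" then ["为保留槽位跳过"] else [])
    let reasons := if reasons = [] then flags else reasons
    let seen : List String :=
      reasons.foldl (fun seen reason => if seen.contains reason then seen else seen ++ [reason]) []
    PySem.Str.join "," seen

-- ===== PORT B =====
def pvBit : PySem.Dict String Nat :=
  ⟨[("short_burst", 1), ("suspicious_short", 1), ("low_coherence", 2),
    ("wide_phase", 2), ("trimmed_head", 4), ("skipped_to_preserve_slots", 8)]⟩

def pvReason : List String := ["尖针/短burst", "angle不聚合", "边界未截净", "为保留槽位跳过"]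

-- recursive first-occurrence dedup: head, then dedup of the tail with head removed
def pvDedup : List String → List String
  | [] => []
  | x :: xs => x :: pvDedup (xs.filter (fun y => y != x))
termination_by xs => xs.length
decreasing_by
  simpa using Nat.lt_succ_of_le (List.length_filter_le _ _)

def summarize_quality_flags_alt (flags : List String) : String :=
  if flags = [] then "正常"
  else
    let mask : Nat := flags.foldl (fun m f => m ||| PySem.Dict.getD pvBit f 0) 0
    if mask ≠ 0 then
      PySem.Str.join ","
        (((PySem.List.enumerate pvReason).filter
            (fun p => (mask >>> p.1.toNat) &&& 1 == 1)).map (·.2))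
    else
      PySem.Str.join "," (pvDedup flags)

-- ===== PRECONDITION & SPEC =====
def Spec_summarize_quality_flags (flags : List String) (out : String) : Prop := out = summarize_quality_flags_alt flags
instance (flags : List String) (out : String) : Decidable (Spec_summarize_quality_flags flags out) := by unfold Spec_summarize_quality_flags; infer_instance

-- ===== CLAIM (what is proved, stated in full; the proofs are below) =====
def Claim_equal_summarize_quality_flags : Prop := ∀ (flags : List String), Dom_summarize_quality_flags flags → Spec_summarize_quality_flags flags (summarize_quality_flags flags)

-- ===== LEMMAS AND PROOFS =====

-- A's "any(flag in {a,b} for flag in flags)" as two membership tests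
lemma any_mem_pair (flags : List String) (a b : String) :
    (flags.any (fun flag => PySem.Set.contains ([a, b] : PySem.Set String) flag))
      = (flags.contains a || flags.contains b) := by
  rw [Bool.eq_iff_iff]
  simp [List.any_eq_true, PySem.Set.contains]
  constructor
  · rintro ⟨x, hx, h | h⟩ <;> subst h <;> simp [hx]
  · rintro (h | h) <;> exact ⟨_, h, by simp⟩

-- closed form of B's bitmask in terms of the four category-presence booleans
def pvM (b12 b34 b5 b6 : Bool) : Nat :=
  (cond b12 1 0) ||| (cond b34 2 0) ||| (cond b5 4 0) ||| (cond b6 8 0)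

lemma pvM_or1 (a b c d : Bool) : 1 ||| pvM a b c d = pvM true b c d := by
  cases a <;> cases b <;> cases c <;> cases d <;> decide

lemma pvM_or2 (a b c d : Bool) : 2 ||| pvM a b c d = pvM a true c d := by
  cases a <;> cases b <;> cases c <;> cases d <;> decide

lemma pvM_or4 (a b c d : Bool) : 4 ||| pvM a b c d = pvM a b true d := by
  cases a <;> cases b <;> cases c <;> cases d <;> decide

lemma pvM_or8 (a b c d : Bool) : 8 ||| pvM a b c d = pvM a b c true := by
  cases a <;> cases b <;> cases c <;> cases d <;> decide

lemma mask_closed : ∀ (flags : List String) (a : Nat),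
    flags.foldl (fun m f => m ||| PySem.Dict.getD pvBit f 0) a
      = a ||| pvM (flags.contains "short_burst" || flags.contains "suspicious_short")
                  (flags.contains "low_coherence" || flags.contains "wide_phase")
                  (flags.contains "trimmed_head")
                  (flags.contains "skipped_to_preserve_slots")
  | [], a => by simp [pvM]
  | x :: xs, a => by
    simp only [List.foldl_cons, mask_closed xs, List.contains_cons]
    rw [Nat.or_assoc]
    congr 1
    by_cases h1 : x = "short_burst" <;> by_cases h2 : x = "suspicious_short" <;>
      by_cases h3 : x = "low_coherence" <;> by_cases h4 : x = "wide_phase" <;>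
      by_cases h5 : x = "trimmed_head" <;> by_cases h6 : x = "skipped_to_preserve_slots" <;>
      first
        | simp_all [PySem.Dict.getD, PySem.Dict.get?, pvBit, beq_iff_eq, Nat.zero_or,
            beq_eq_false_iff_ne.mpr (Ne.symm h1), beq_eq_false_iff_ne.mpr (Ne.symm h2),
            beq_eq_false_iff_ne.mpr (Ne.symm h3), beq_eq_false_iff_ne.mpr (Ne.symm h4),
            beq_eq_false_iff_ne.mpr (Ne.symm h5), beq_eq_false_iff_ne.mpr (Ne.symm h6)]
        | simp_all [PySem.Dict.getD, PySem.Dict.get?, pvBit, beq_iff_eq,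
            pvM_or1, pvM_or2, pvM_or4, pvM_or8]

-- adding elements equal to an already-present x is a no-op
lemma foldl_add_filter (x : String) : ∀ (xs : List String) (s : PySem.Set String), x ∈ s →
    List.foldl PySem.Set.add s xs = List.foldl PySem.Set.add s (xs.filter (fun y => y != x))
  | [], _, _ => rfl
  | y :: ys, s, hx => by
    by_cases h : y = x
    · have hy : y ∈ s := by rw [h]; exact hx
      have hadd : PySem.Set.add s y = s := by
        simp [PySem.Set.add, PySem.Set.contains, List.contains_eq_mem, hy]
      rw [show (y :: ys).filter (fun z => z != x) = ys.filter (fun z => z != x) from by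
            simp [h], List.foldl_cons, hadd]
      exact foldl_add_filter x ys s hx
    · simp only [List.filter_cons, bne_iff_ne, ne_eq, h, not_false_eq_true, decide_true,
        if_true, List.foldl_cons]
      exact foldl_add_filter x ys (PySem.Set.add s y)
        ((PySem.Set.mem_add s y x).mpr (Or.inl hx))

-- a head no later element equals can be pulled out of the accumulator
lemma cons_foldl_add (x : String) : ∀ (ys : List String) (s : List String),
    (∀ y ∈ ys, y ≠ x) →
    List.foldl PySem.Set.add (x :: s) ys = x :: List.foldl PySem.Set.add s ys
  | [], s, _ => rfl
  | y :: ys, s, h => by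
    have hyx : y ≠ x := h y (by simp)
    have hc : PySem.Set.contains (x :: s) y = PySem.Set.contains s y := by
      simp [PySem.Set.contains, List.contains_cons, hyx]
    have hadd : PySem.Set.add (x :: s) y = x :: PySem.Set.add s y := by
      simp only [PySem.Set.add, hc]
      split <;> rfl
    simp only [List.foldl_cons, hadd]
    exact cons_foldl_add x ys (PySem.Set.add s y) (fun z hz => h z (by simp [hz]))

-- B's recursive dedup computes list(dict.fromkeys(xs))
lemma pvDedup_eq : ∀ (xs : List String), pvDedup xs = PySem.List.dedup xs
  | [] => by
    simp [pvDedup, PySem.List.dedup_eq_ofList, PySem.Set.ofList_eq_foldl]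
  | x :: xs => by
    rw [pvDedup, pvDedup_eq (xs.filter (fun y => y != x))]
    simp only [PySem.List.dedup_eq_ofList, PySem.Set.ofList_eq_foldl, List.foldl_cons]
    have h0 : PySem.Set.add ([] : List String) x = [x] := rfl
    rw [h0, foldl_add_filter x xs [x] (by simp),
        cons_foldl_add x _ [] (fun y hy => by
          simpa using (List.of_mem_filter hy))]
termination_by xs => xs.length
decreasing_by
  simpa using Nat.lt_succ_of_le (List.length_filter_le _ _)

-- A's first-occurrence dedup loop (as simp normalizes it) is B's recursive dedup
lemma dedup_both (flags : List String) :
    List.foldl (fun seen reason => if reason ∈ seen then seen else seen ++ [reason]) [] flags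
      = pvDedup flags := by
  rw [pvDedup_eq, PySem.List.dedup_eq_ofList, PySem.Set.ofList_eq_foldl]
  congr 1
  funext s r
  simp [PySem.Set.add, PySem.Set.contains, List.contains_eq_mem]

-- ===== VERDICT (by name: the statement is the Claim_ definition above) =====
theorem summarize_quality_flags_spec : Claim_equal_summarize_quality_flags := by
  intro flags _
  unfold Spec_summarize_quality_flags summarize_quality_flags summarize_quality_flags_alt
  by_cases h : flags = []
  · simp [h]
  · simp only [if_neg h, any_mem_pair, mask_closed, Nat.zero_or]
    generalize flags.contains "short_burst" = b1
    generalize flags.contains "suspicious_short" = b2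
    generalize flags.contains "low_coherence" = b3
    generalize flags.contains "wide_phase" = b4
    generalize flags.contains "trimmed_head" = b5
    generalize flags.contains "skipped_to_preserve_slots" = b6
    cases b1 <;> cases b2 <;> cases b3 <;> cases b4 <;> cases b5 <;> cases b6 <;>
      simp [pvM, dedup_both] <;> decide
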